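-- pv_equiv track=rewrite | github.com/MrBrantCode/unitest_baseline | mut_generate/mist_train_cf/cf_6010/solution.py | replace_zeros
-- ===== SOURCE A (Python) =====
-- def replace_zeros(input_list):
--     if isinstance(input_list, list):
--         for i in range(len(input_list)):
--             if isinstance(input_list[i], list):
--                 input_list[i] = replace_zeros(input_list[i])
--             elif input_list[i] == 0:
--                 input_list[i] = 1
--     elif input_list == 0:
--         input_list = 1
--     return input_list
-- ===== SOURCE B (Python) =====
-- def replace_zeros(input_list):
--     if not isinstance(input_list, list):
--         return 1 if input_list == 0 else input_list
--     # explicit-stack DFS instead of recursion: pop a list, push its sublists,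
--     # then repeatedly locate the first 0 with list.index and overwrite it in place
--     stack = [input_list]
--     while stack:
--         cur = stack.pop()
--         for x in cur:
--             if isinstance(x, list):
--                 stack.append(x)
--         while True:
--             try:
--                 cur[cur.index(0)] = 1
--             except ValueError:
--                 break
--     return input_list
-- ===== Notes on version B (the rewrite author's own statement) =====
-- stated objective: alternative
-- what changed: A recursively sweeps each list by index and rewrites zero slots as it goes; B removes the recursion with an explicit stack of lists and, per list, repeatedly finds the first remaining 0 via list.index and overwrites it until a ValueError signals none are left.
import Mathlib
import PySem

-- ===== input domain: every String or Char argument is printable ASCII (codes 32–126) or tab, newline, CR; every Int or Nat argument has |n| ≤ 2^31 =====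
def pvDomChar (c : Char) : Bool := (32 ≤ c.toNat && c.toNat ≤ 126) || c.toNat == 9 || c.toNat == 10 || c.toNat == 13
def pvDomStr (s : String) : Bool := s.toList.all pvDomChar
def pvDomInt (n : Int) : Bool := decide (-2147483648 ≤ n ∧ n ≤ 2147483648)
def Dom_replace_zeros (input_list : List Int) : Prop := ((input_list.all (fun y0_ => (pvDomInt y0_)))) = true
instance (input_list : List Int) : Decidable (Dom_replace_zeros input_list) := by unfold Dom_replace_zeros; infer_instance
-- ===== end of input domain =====

-- B replaces A's recursive index sweep with an explicit-stack DFS whose inner loop repeatedly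
-- finds the first remaining 0 with list.index and overwrites it (objective: alternative algorithm).
-- Both A and B mutate the argument in place and return the same object; the equivalence proved
-- here is about the RETURN value.

-- ===== PORT A =====
-- A: for i in range(len(input_list)): if input_list[i] == 0: input_list[i] = 1
-- (on List Int the isinstance(.., list) branch is statically false)
def replace_zeros (input_list : List Int) : List Int :=
  (PySem.List.pyRange 0 input_list.length 1).foldl
    (fun acc i =>
      if PySem.List.pyGetD acc i 0 = 0 then PySem.List.pySetD acc i 1 else acc)
    input_list

-- ===== PORT B =====
-- Termination measure for B's inner while-loop: setting the first 0 to 1 lowers the count of 0s.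
lemma rz_count_set_lt (l : List Int) (i : Nat) (hi : i < l.length) (h0 : l[i] = 0) :
    (l.set i (1 : Int)).count 0 < l.count 0 := by
  induction l generalizing i with
  | nil => simp at hi
  | cons a t ih =>
    cases i with
    | zero =>
      simp only [List.getElem_cons_zero] at h0
      subst h0
      simp
    | succ n =>
      simp only [List.getElem_cons_succ] at h0
      have := ih n (by simpa using hi) h0
      simp only [List.set_cons_succ, List.count_cons]
      omega

-- B's inner loop: `while True: try: cur[cur.index(0)] = 1 except ValueError: break`
def rzInner (cur : List Int) : List Int :=
  match h : PySem.List.index? cur 0 with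
  | none => cur
  | some i =>
      rzInner (PySem.List.pySetD cur (i : Int) 1)
termination_by cur.count 0
decreasing_by
  obtain ⟨hk, h0, _⟩ := PySem.List.getElem_of_index?_eq_some h
  rw [PySem.List.pySetD_natCast]
  exact rz_count_set_lt cur i hk h0

-- B's stack loop: stack = [input_list]; on List Int no element is a list, so nothing is ever
-- pushed and the loop processes exactly the initial frame with the inner loop above.
def replace_zeros_alt (input_list : List Int) : List Int :=
  rzInner input_list

-- ===== PRECONDITION & SPEC =====
def Spec_replace_zeros (input_list : List Int) (out : List Int) : Prop := out = replace_zeros_alt input_list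
instance (input_list : List Int) (out : List Int) : Decidable (Spec_replace_zeros input_list out) := by unfold Spec_replace_zeros; infer_instance

-- ===== CLAIM (what is proved, stated in full; the proofs are below) =====
def Claim_equal_replace_zeros : Prop := ∀ (input_list : List Int), Dom_replace_zeros input_list → Spec_replace_zeros input_list (replace_zeros input_list)

-- ===== LEMMAS AND PROOFS =====
-- A's loop invariant: processing indices k..n-1 maps the suffix, leaving the prefix alone.
lemma replace_zeros_loop (k : Nat) (acc : List Int) (hk : k ≤ acc.length) :
    (PySem.List.pyRange k acc.length 1).foldl
      (fun acc i =>
        if PySem.List.pyGetD acc i 0 = 0 then PySem.List.pySetD acc i 1 else acc)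
      acc
    = acc.take k ++ (acc.drop k).map (fun x => if x = 0 then 1 else x) := by
  induction h : acc.length - k generalizing k acc with
  | zero =>
    have hk' : k = acc.length := by omega
    subst hk'
    rw [PySem.List.pyRange_one_eq_nil (by omega)]
    simp
  | succ m ih =>
    have hlt : k < acc.length := by omega
    rw [PySem.List.pyRange_one_cons (by exact_mod_cast hlt)]
    simp only [List.foldl_cons]
    have hget : PySem.List.pyGetD acc (k : Int) 0 = acc[k] := by
      rw [PySem.List.pyGetD_natCast]
      exact List.getD_eq_getElem acc 0 hlt
    have hdrop : acc.drop k = acc[k] :: acc.drop (k + 1) :=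
      List.drop_eq_getElem_cons hlt
    by_cases h0 : acc[k] = 0
    · rw [if_pos (by rw [hget, h0])]
      have hset : PySem.List.pySetD acc (k : Int) 1 = acc.set k 1 := by
        simp [PySem.List.pySetD, PySem.List.pySet?_natCast acc k 1 hlt]
      rw [hset]
      have hlen : (acc.set k 1).length = acc.length := by simp
      have ihc := ih (k + 1) (acc.set k 1) (by omega) (by omega)
      push_cast at ihc
      rw [hlen] at ihc
      rw [ihc]
      rw [List.take_add_one, List.drop_set, List.take_set]
      simp [hdrop, hlt, h0, List.set_eq_of_length_le]
    · rw [if_neg (by rw [hget]; exact h0)]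
      have ihc := ih (k + 1) acc (by omega) (by omega)
      push_cast at ihc
      rw [ihc, hdrop, List.map_cons, if_neg h0, ← List.take_concat_get (l := acc) (i := k)]
      · simp
      · exact hlt

-- B's loop characterisation: the find-first-0-and-set loop ends at the same map.
lemma rzInner_eq_map (cur : List Int) :
    rzInner cur = cur.map (fun x => if x = 0 then 1 else x) := by
  induction hn : cur.count 0 using Nat.strong_induction_on generalizing cur with
  | _ n ih =>
  rw [rzInner]
  split
  · next h =>
    rw [PySem.List.index?_eq_none_iff] at h
    apply List.ext_getElem (by simp)
    intro j hj1 hj2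
    have hne : cur[j] ≠ 0 := fun he => h (he ▸ List.getElem_mem hj1)
    simp [hne]
  · next i h =>
    obtain ⟨hk, h0, _⟩ := PySem.List.getElem_of_index?_eq_some h
    rw [PySem.List.pySetD_natCast]
    have hlt := rz_count_set_lt cur i hk h0
    rw [ih ((cur.set i 1).count 0) (by omega) _ rfl]
    apply List.ext_getElem
    · simp
    · intro j hj1 hj2
      simp only [List.getElem_map, List.getElem_set]
      by_cases hij : i = j
      · subst hij
        simp [h0]
      · simp [hij]

-- ===== VERDICT (by name: the statement is the Claim_ definition above) =====
theorem replace_zeros_spec : Claim_equal_replace_zeros := by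
  intro input_list _
  unfold Spec_replace_zeros replace_zeros replace_zeros_alt
  rw [rzInner_eq_map]
  have := replace_zeros_loop 0 input_list (by omega)
  simpa using this
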